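-- pv_equiv track=rewrite | github.com/devinda0/veracity-hackathon | agents/tools/community_tool.py | _sentiment_label
-- ===== SOURCE A (Python) =====
-- _POSITIVE_TERMS = {
--     "great",
--     "good",
--     "excellent",
--     "love",
--     "promising",
--     "growth",
--     "opportunity",
--     "success",
--     "improve",
--     "innovative",
-- }
--
-- _NEGATIVE_TERMS = {
--     "bad",
--     "poor",
--     "decline",
--     "risk",
--     "problem",
--     "issue",
--     "fail",
--     "failure",
--     "concern",
--     "expensive",
-- }
--
-- def _sentiment_label(text: str) -> str:
--     """Very light-weight lexical sentiment label."""
--     lowered = (text or "").lower()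
--     positive_hits = sum(1 for term in _POSITIVE_TERMS if term in lowered)
--     negative_hits = sum(1 for term in _NEGATIVE_TERMS if term in lowered)
--     if positive_hits > negative_hits:
--         return "positive"
--     if negative_hits > positive_hits:
--         return "negative"
--     return "neutral"
-- ===== SOURCE B (Python) =====
-- _POSITIVE_TERMS = {
--     "great", "good", "excellent", "love", "promising",
--     "growth", "opportunity", "success", "improve", "innovative",
-- }
--
-- _NEGATIVE_TERMS = {
--     "bad", "poor", "decline", "risk", "problem",
--     "issue", "fail", "failure", "concern", "expensive",
-- }
--
-- # One combined term->weight map (+1 positive, -1 negative); the sets are disjoint.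
-- _WEIGHTS = {**{t: 1 for t in _POSITIVE_TERMS}, **{t: -1 for t in _NEGATIVE_TERMS}}
--
--
-- def _sentiment_label(text: str) -> str:
--     """Very light-weight lexical sentiment label."""
--     lowered = (text or "").lower()
--     # Text-driven multi-pattern scan: walk every start position of the text once
--     # and record which terms begin there; presence-set, not occurrence counts.
--     matched = {t for i in range(len(lowered))
--                for t in _WEIGHTS if lowered.startswith(t, i)}
--     score = sum(_WEIGHTS[t] for t in matched)
--     return "positive" if score > 0 else "negative" if score < 0 else "neutral"
-- ===== Notes on version B (the rewrite author's own statement) =====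
-- stated objective: alternative
-- what changed: Replaces A's term-driven counting (one 'term in text' substring test per term, two counts compared) with a text-driven multi-pattern scan: one walk over every start position of the lowered text collecting the set of terms that begin there via startswith, then summing signed weights of the matched set (correct because the term sets are disjoint and a nonempty substring occurs iff it starts at some position).
import Mathlib
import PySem

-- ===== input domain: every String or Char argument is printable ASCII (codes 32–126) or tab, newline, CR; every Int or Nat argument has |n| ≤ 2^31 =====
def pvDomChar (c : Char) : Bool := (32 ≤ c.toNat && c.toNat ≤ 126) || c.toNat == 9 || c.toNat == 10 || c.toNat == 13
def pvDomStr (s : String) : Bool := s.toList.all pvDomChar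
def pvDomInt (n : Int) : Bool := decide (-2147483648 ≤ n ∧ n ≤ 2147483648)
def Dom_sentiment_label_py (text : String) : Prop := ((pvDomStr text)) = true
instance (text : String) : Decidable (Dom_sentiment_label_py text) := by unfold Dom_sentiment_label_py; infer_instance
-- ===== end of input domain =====

-- B replaces A's term-driven 'term in text' counting with a text-driven scan over start
-- positions collecting matched terms into a set, then summing signed weights (objective: alternative).


-- ===== PORT A =====
def pvPosTerms : List String :=
  ["great", "good", "excellent", "love", "promising",
   "growth", "opportunity", "success", "improve", "innovative"]

def pvNegTerms : List String :=
  ["bad", "poor", "decline", "risk", "problem",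
   "issue", "fail", "failure", "concern", "expensive"]

def sentiment_label_py (text : String) : String :=
  let lowered := PySem.Str.lower (if text == "" then "" else text)
  let positive_hits : Int :=
    pvPosTerms.foldl (fun acc term => if PySem.Str.isIn term lowered then acc + 1 else acc) 0
  let negative_hits : Int :=
    pvNegTerms.foldl (fun acc term => if PySem.Str.isIn term lowered then acc + 1 else acc) 0
  if positive_hits > negative_hits then "positive"
  else if negative_hits > positive_hits then "negative"
  else "neutral"

-- ===== PORT B =====
-- _WEIGHTS : term -> +1 / -1 (positive terms first, then negative, as the dict is built)
def pvWeights : PySem.Dict String Int :=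
  PySem.Dict.ofList
    [("great", 1), ("good", 1), ("excellent", 1), ("love", 1), ("promising", 1),
     ("growth", 1), ("opportunity", 1), ("success", 1), ("improve", 1), ("innovative", 1),
     ("bad", -1), ("poor", -1), ("decline", -1), ("risk", -1), ("problem", -1),
     ("issue", -1), ("fail", -1), ("failure", -1), ("concern", -1), ("expensive", -1)]

def sentiment_label_py_alt (text : String) : String :=
  let lowered := PySem.Str.lower (if text == "" then "" else text)
  let chars := lowered.toList
  -- {t for i in range(len(lowered)) for t in _WEIGHTS if lowered.startswith(t, i)}
  -- range(n) over valid indices is ported as List.range n (all indices are Nats ≥ 0);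
  -- lowered.startswith(t, i) with 0 ≤ i < n is exactly: t is a prefix of lowered[i:].
  let matched : PySem.Set String :=
    (List.range chars.length).foldl
      (fun m i =>
        pvWeights.keys.foldl
          (fun m t => if PySem.Chars.startswith (chars.drop i) t.toList then PySem.Set.add m t else m)
          m)
      PySem.Set.empty
  -- sum(_WEIGHTS[t] for t in matched): order-independent sum over the set
  let score : Int := (matched.map (fun t => pvWeights.getD t 0)).sum
  if score > 0 then "positive" else if score < 0 then "negative" else "neutral"

-- ===== PRECONDITION & SPEC =====
def Spec_sentiment_label_py (text : String) (out : String) : Prop := out = sentiment_label_py_alt text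
instance (text : String) (out : String) : Decidable (Spec_sentiment_label_py text out) := by unfold Spec_sentiment_label_py; infer_instance

-- ===== CLAIM (what is proved, stated in full; the proofs are below) =====
def Claim_equal_sentiment_label_py : Prop := ∀ (text : String), Dom_sentiment_label_py text → Spec_sentiment_label_py text (sentiment_label_py text)

-- ===== LEMMAS AND PROOFS =====

-- membership in the inner per-position fold
theorem pv_mem_inner_fold (chars : List Char) (i : Nat) (ts : List String) (m : PySem.Set String) (y : String) :
    y ∈ ts.foldl (fun m t => if PySem.Chars.startswith (chars.drop i) t.toList then PySem.Set.add m t else m) m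
      ↔ y ∈ m ∨ (y ∈ ts ∧ PySem.Chars.startswith (chars.drop i) y.toList = true) := by
  induction ts generalizing m with
  | nil => simp
  | cons x xs ih =>
    by_cases h : PySem.Chars.startswith (chars.drop i) x.toList = true
    · simp only [List.foldl_cons, h, if_pos]
      rw [ih]
      simp only [PySem.Set.mem_add, List.mem_cons]
      constructor
      · rintro ((hy | rfl) | ⟨hy, hs⟩)
        · exact Or.inl hy
        · exact Or.inr ⟨Or.inl rfl, h⟩
        · exact Or.inr ⟨Or.inr hy, hs⟩
      · rintro (hy | ⟨(rfl | hy), hs⟩)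
        · exact Or.inl (Or.inl hy)
        · exact Or.inl (Or.inr rfl)
        · exact Or.inr ⟨hy, hs⟩
    · simp only [List.foldl_cons, h, if_neg, Bool.false_eq_true, not_false_iff]
      rw [ih]
      constructor
      · rintro (hy | ⟨hy, hs⟩)
        · exact Or.inl hy
        · exact Or.inr ⟨List.mem_cons_of_mem _ hy, hs⟩
      · rintro (hy | ⟨hy, hs⟩)
        · exact Or.inl hy
        · rcases List.mem_cons.mp hy with rfl | hy
          · exact absurd hs h
          · exact Or.inr ⟨hy, hs⟩

-- nodup is preserved by the inner fold
theorem pv_nodup_inner_fold (chars : List Char) (i : Nat) (ts : List String) (m : PySem.Set String)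
    (h : m.Nodup) :
    (ts.foldl (fun m t => if PySem.Chars.startswith (chars.drop i) t.toList then PySem.Set.add m t else m) m).Nodup := by
  induction ts generalizing m with
  | nil => exact h
  | cons x xs ih =>
    simp only [List.foldl_cons]
    split
    · exact ih _ (PySem.Set.nodup_add _ _ h)
    · exact ih _ h

-- membership in the outer fold over positions
theorem pv_mem_outer_fold (chars : List Char) (ts : List String) (is : List Nat) (m : PySem.Set String) (y : String) :
    y ∈ is.foldl (fun m i => ts.foldl (fun m t => if PySem.Chars.startswith (chars.drop i) t.toList then PySem.Set.add m t else m) m) m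
      ↔ y ∈ m ∨ (y ∈ ts ∧ ∃ i ∈ is, PySem.Chars.startswith (chars.drop i) y.toList = true) := by
  induction is generalizing m with
  | nil => simp
  | cons j js ih =>
    simp only [List.foldl_cons]
    rw [ih, pv_mem_inner_fold]
    constructor
    · rintro ((hy | ⟨hy, hs⟩) | ⟨hy, i, hi, hs⟩)
      · exact Or.inl hy
      · exact Or.inr ⟨hy, j, List.mem_cons_self, hs⟩
      · exact Or.inr ⟨hy, i, List.mem_cons_of_mem _ hi, hs⟩
    · rintro (hy | ⟨hy, i, hi, hs⟩)
      · exact Or.inl (Or.inl hy)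
      · rcases List.mem_cons.mp hi with rfl | hi
        · exact Or.inl (Or.inr ⟨hy, hs⟩)
        · exact Or.inr ⟨hy, i, hi, hs⟩

theorem pv_nodup_outer_fold (chars : List Char) (ts : List String) (is : List Nat) (m : PySem.Set String)
    (h : m.Nodup) :
    (is.foldl (fun m i => ts.foldl (fun m t => if PySem.Chars.startswith (chars.drop i) t.toList then PySem.Set.add m t else m) m) m).Nodup := by
  induction is generalizing m with
  | nil => exact h
  | cons j js ih => exact ih _ (pv_nodup_inner_fold chars j ts m h)

-- a nonempty pattern is a substring iff it starts at some position < length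
theorem pv_exists_pos_iff_isIn (chars : List Char) (t : List Char) (ht : t ≠ []) :
    (∃ i ∈ List.range chars.length, PySem.Chars.startswith (chars.drop i) t = true)
      ↔ PySem.Chars.isIn t chars = true := by
  rw [← PySem.Chars.exists_prefix_drop_iff_isIn]
  constructor
  · rintro ⟨i, _, hs⟩
    exact ⟨i, (PySem.Chars.startswith_iff _ _).mp hs⟩
  · rintro ⟨j, hj⟩
    by_cases hlt : j < chars.length
    · exact ⟨j, List.mem_range.mpr hlt, (PySem.Chars.startswith_iff _ _).mpr hj⟩
    · exfalso
      have : chars.drop j = [] := List.drop_eq_nil_of_le (le_of_not_gt hlt)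
      rw [this] at hj
      exact ht (List.prefix_nil.mp hj)

-- summing a constant over a filtered list counts the hits
theorem pv_sum_map_filter_const (p : String → Bool) (f : String → Int) (c : Int) (l : List String)
    (h : ∀ t ∈ l, f t = c) :
    ((l.filter p).map f).sum = c * (l.countP p : Int) := by
  induction l with
  | nil => simp
  | cons x xs ih =>
    have hx := h x List.mem_cons_self
    have ih' := ih (fun t ht => h t (List.mem_cons_of_mem _ ht))
    by_cases hp : p x
    · simp [hp, hx, ih']
      ring
    · simp [hp, ih']

-- ===== VERDICT (by name: the statement is the Claim_ definition above) =====
theorem sentiment_label_py_spec : Claim_equal_sentiment_label_py := by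
  intro text _
  unfold Spec_sentiment_label_py sentiment_label_py sentiment_label_py_alt
  dsimp only
  set lowered := PySem.Str.lower (if text == "" then "" else text) with hl
  set chars := lowered.toList with hc
  set p : String → Bool := fun t => PySem.Chars.isIn t.toList chars with hp
  have hA : ∀ (l : List String),
      l.foldl (fun acc term => if PySem.Str.isIn term lowered then acc + 1 else acc) (0 : Int)
        = (l.countP p : Int) := by
    intro l
    have := PySem.List.foldl_if_add_one p l (0 : Int)
    simpa [hp, PySem.Str.isIn, hc] using this
  have hkeys : pvWeights.keys = pvPosTerms ++ pvNegTerms := by decide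
  have hne : ∀ y ∈ pvWeights.keys, y.toList ≠ [] := by decide
  set matched :=
    (List.range chars.length).foldl
      (fun m i =>
        pvWeights.keys.foldl
          (fun m t => if PySem.Chars.startswith (chars.drop i) t.toList then PySem.Set.add m t else m)
          m)
      PySem.Set.empty with hm
  have hmem : ∀ y, y ∈ matched ↔ y ∈ pvWeights.keys ∧ p y = true := by
    intro y
    rw [hm, pv_mem_outer_fold]
    constructor
    · rintro (hy | ⟨hy, hex⟩)
      · exact absurd hy (List.not_mem_nil)
      · exact ⟨hy, (pv_exists_pos_iff_isIn chars y.toList (hne y hy)).mp hex⟩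
    · rintro ⟨hy, hpy⟩
      exact Or.inr ⟨hy, (pv_exists_pos_iff_isIn chars y.toList (hne y hy)).mpr hpy⟩
  have hnodup : matched.Nodup := pv_nodup_outer_fold _ _ _ _ List.nodup_nil
  have hnodupK : pvWeights.keys.Nodup := by decide
  have hperm : matched.Perm (pvWeights.keys.filter p) := by
    rw [List.perm_ext_iff_of_nodup hnodup (hnodupK.filter p)]
    intro y
    rw [hmem, List.mem_filter]
  have hsum : (matched.map (fun t => pvWeights.getD t 0)).sum
      = ((pvWeights.keys.filter p).map (fun t => pvWeights.getD t 0)).sum :=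
    (hperm.map _).sum_eq
  have hpos1 : ∀ t ∈ pvPosTerms, pvWeights.getD t 0 = 1 := by decide
  have hneg1 : ∀ t ∈ pvNegTerms, pvWeights.getD t 0 = -1 := by decide
  have hscore : (matched.map (fun t => pvWeights.getD t 0)).sum
      = (pvPosTerms.countP p : Int) - (pvNegTerms.countP p : Int) := by
    rw [hsum, hkeys, List.filter_append, List.map_append, List.sum_append,
        pv_sum_map_filter_const p _ 1 _ hpos1, pv_sum_map_filter_const p _ (-1) _ hneg1]
    ring
  simp only [hA, hscore]
  split_ifs <;> first | rfl | omega
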